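-- pv_equiv track=rewrite | github.com/ahmedkakiAK/ensae-prog23 | delivery_network/main.py | min_power_tree
-- ===== SOURCE A (Python) =====
-- def min_power_tree(tree,src,dest):
--     """""   Fonction : min_power_tree
--     Description:
--     -----------
--     trouve le chemin entre deux noeuds dans un arbre en remontant les ancêtres pour touver
--     l'ancêtre minimum. On peut utiliser la profondeur des noeuds pour aller plus vite mais c'est déjà assez
--     rapide sans. On utilise la profondeur dans la séance 3 où le même principe est repris
--     pour aller justement beaucoup plus vite.
--     Input:
--     ------
--     src : noeud de départ
--     type : int
--     dest : noeud d'arrivé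
--     type : int
--     tree : arbre
--     output :
--     -------
--     un couple contenant la puissance minimal et le chemin de src à dest
--     Complexity : O(N) dans le pire cas. On se retrouve à parcourir tous les sommets
--     """
--     # Remonter les ancêtres de src
--     src_ancestors = []
--     curr = src
--     while curr!=1: #CHOIX ARBITRAIRE DE LA RACINE COMME ÉTANT 1
--         src_ancestors.append([curr,tree[curr][0][1]])
--         curr = tree[curr][0][0]
--     src_ancestors.append([1,0])
--     # Remonter les ancêtres de dest
--     dest_ancestors = []
--     curr = dest
--     while curr!=1: #CHOIX ARBITRAIRE DE LA RACINE COMME ÉTANT 1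
--         dest_ancestors.append([curr,tree[curr][0][1]])
--         curr = tree[curr][0][0]
--     dest_ancestors.append([1,0])
--     # Trouver l'indice du premier ancêtre commun entre src et dest. On peut utiliser la profondeur pour éviter de remonter jusqu'à la racine
--     i = len(src_ancestors) - 1
--     j = len(dest_ancestors) - 1
--     while i >= 0 and j >= 0 and src_ancestors[i][0] == dest_ancestors[j][0]:
--         i -= 1
--         j -= 1
--     # Concaténer les chemins de src et dest jusqu'à l'ancêtre commun
--     path =src_ancestors[:i+2]
--     path[i+1][1]=0 #Car on ne prend en compte la puissance de l'ancêtre vers son parent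
--     path.extend(reversed(dest_ancestors[:j+1]))
--     power, chemin=max([x[1] for x in path]), [i[0] for i in path]
--     return chemin,power
-- ===== SOURCE B (Python) =====
-- def min_power_tree(tree, src, dest):
--     # Climb from src to the root (node 1), recording (node, power-to-parent).
--     anc = []
--     c = src
--     while c != 1:
--         e = tree[c][0]
--         anc.append((c, e[1]))
--         c = e[0]
--     anc.append((1, 0))
--     nodes = [n for n, _ in anc]
--     on_src_chain = set(nodes)
--     # Climb from dest only until we first hit src's chain: that node is the LCA.
--     tail = []
--     c = dest
--     while c not in on_src_chain:
--         e = tree[c][0]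
--         tail.append((c, e[1]))
--         c = e[0]
--     k = nodes.index(c)
--     path_nodes = nodes[:k] + [c] + [n for n, _ in reversed(tail)]
--     power = 0
--     for _, p in anc[:k] + tail:
--         power = max(power, p)
--     return path_nodes, power
-- ===== Notes on version B (the rewrite author's own statement) =====
-- stated objective: alternative
-- what changed: Instead of climbing both nodes all the way to the root and scanning the two ancestor lists backwards in lockstep to locate the LCA, B builds src's ancestor chain once with a set of its nodes, climbs from dest only until it first hits that set (that node is the LCA), and assembles the path and running max directly.
import Mathlib
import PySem

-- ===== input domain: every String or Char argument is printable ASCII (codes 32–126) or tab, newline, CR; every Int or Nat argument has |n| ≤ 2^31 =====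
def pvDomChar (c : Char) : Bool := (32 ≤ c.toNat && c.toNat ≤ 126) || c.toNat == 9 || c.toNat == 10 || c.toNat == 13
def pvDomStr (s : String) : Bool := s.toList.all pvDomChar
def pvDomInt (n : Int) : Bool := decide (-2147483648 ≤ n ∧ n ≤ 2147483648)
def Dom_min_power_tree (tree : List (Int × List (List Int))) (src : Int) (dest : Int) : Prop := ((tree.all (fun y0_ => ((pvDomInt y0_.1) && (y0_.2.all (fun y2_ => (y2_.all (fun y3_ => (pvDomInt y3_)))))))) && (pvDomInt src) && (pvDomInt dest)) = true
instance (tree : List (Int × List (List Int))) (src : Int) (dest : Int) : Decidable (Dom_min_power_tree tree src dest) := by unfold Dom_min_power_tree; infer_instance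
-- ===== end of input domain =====

-- B rebuilds the path by climbing dest only until it first meets src's ancestor chain (kept as a set),
-- instead of climbing both nodes to the root and comparing the two ancestor lists backwards in lockstep.

-- ===== PORT A =====
-- tree[c][0] : dict lookup, then first adjacency entry [parent, power]; none = KeyError/IndexError
def pvStep (tree : List (Int × List (List Int))) (c : Int) : Option (Int × Int) :=
  match (PySem.Dict.mk tree).get? c with
  | none => none
  | some [] => none
  | some (e :: _) =>
      match e with
      | p :: w :: _ => some (p, w)
      | _ => none

-- the 'while curr != 1: ancestors.append([curr, tree[curr][0][1]]); curr = tree[curr][0][0]' loop,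
-- identical in A and in B (Source B), with fuel; fuel tree.length+1 is enough for every terminating run,
-- none = the Python raises or loops forever (excluded by Pre_)
def pvChain (tree : List (Int × List (List Int))) : Nat → Int → Option (List (Int × Int))
  | 0, c => if c = 1 then some [(1, 0)] else none
  | f + 1, c =>
      if c = 1 then some [(1, 0)] else
      match pvStep tree c with
      | none => none
      | some pw => (pvChain tree f pw.1).map (fun rest => (c, pw.2) :: rest)

-- A's backwards lockstep loop: while i >= 0 and j >= 0 and s[i][0] == d[j][0]: i -= 1; j -= 1
def pvLcaLoop (s d : List (Int × Int)) (i j : Int) : Int × Int :=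
  if _hij : 0 ≤ i ∧ 0 ≤ j then
    match PySem.List.pyGet? s i, PySem.List.pyGet? d j with
    | some a, some b =>
        if a.1 = b.1 then pvLcaLoop s d (i - 1) (j - 1) else (i, j)
    | _, _ => (i, j)   -- IndexError: unreachable from A's call (i < len s, j < len d)
  else (i, j)
termination_by (i + 1).toNat
decreasing_by omega

def min_power_tree (tree : List (Int × List (List Int))) (src : Int) (dest : Int) : List Int × Int :=
  let fuel := tree.length + 1
  match pvChain tree fuel src, pvChain tree fuel dest with
  | some srcAnc, some destAnc =>
      let ij := pvLcaLoop srcAnc destAnc ((srcAnc.length : Int) - 1) ((destAnc.length : Int) - 1)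
      let i := ij.1
      let j := ij.2
      let path := PySem.List.slice srcAnc none (some (i + 2))       -- src_ancestors[:i+2]
      let path := match path[(i + 1).toNat]? with                   -- path[i+1][1] = 0  (i+1 ≥ 0 always)
        | some e => path.set (i + 1).toNat (e.1, 0)
        | none => path                                              -- IndexError: unreachable under Pre_
      let path := path ++ (PySem.List.slice destAnc none (some (j + 1))).reverse
      (path.map (·.1), (PySem.List.max? (path.map (·.2)) (fun x => x)).getD 0)
  | _, _ => ([], 0)   -- the Python raises or loops forever here: outside Pre_

-- ===== PORT B =====
-- Source B's second loop: climb from dest until the current node is on src's chain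
def pvDescend (tree : List (Int × List (List Int))) (S : PySem.Set Int) :
    Nat → Int → Option (List (Int × Int) × Int)
  | 0, c => if PySem.Set.contains S c then some ([], c) else none
  | f + 1, c =>
      if PySem.Set.contains S c then some ([], c) else
      match pvStep tree c with
      | none => none
      | some pw => (pvDescend tree S f pw.1).map (fun r => ((c, pw.2) :: r.1, r.2))

def min_power_tree_alt (tree : List (Int × List (List Int))) (src : Int) (dest : Int) : List Int × Int :=
  let fuel := tree.length + 1
  match pvChain tree fuel src with      -- same climb loop as in Source B (textually identical to A's first loop)
  | none => ([], 0)
  | some anc =>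
      let nodes := anc.map (·.1)
      let onSrcChain := PySem.Set.ofList nodes
      match pvDescend tree onSrcChain fuel dest with
      | none => ([], 0)
      | some td =>
          let tail := td.1
          let c := td.2
          let k := (PySem.List.index? nodes c).getD 0   -- nodes.index(c)
          let pathNodes := nodes.take k ++ [c] ++ (tail.reverse.map (·.1))
          let power := (anc.take k ++ tail).foldl (fun acc e => max acc e.2) 0
          (pathNodes, power)

-- ===== PRECONDITION & SPEC =====
-- n-fold parent-of map: follow the tree's parent links n times (none = a missing/short entry)
def pvParentIter (tree : List (Int × List (List Int))) : Nat → Int → Option Int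
  | 0, c => some c
  | n + 1, c =>
      match pvStep tree c with
      | none => none
      | some pw => pvParentIter tree n pw.1

-- Pre_ = src and dest both lie on parent-paths reaching the root 1. Reachability along the
-- tree's parent links is inherently a path property, so it is stated with pvParentIter, the
-- bare n-fold parent map (no path or power bookkeeping — not the ports' loop), with n bounded
-- by tree.length, which every cycle-free ancestor path satisfies (its nodes are distinct dict
-- keys). Exactly on these inputs A's two climbs return; elsewhere A raises a KeyError or
-- IndexError, or loops forever on a parent cycle.
def Pre_min_power_tree (tree : List (Int × List (List Int))) (src : Int) (dest : Int) : Prop :=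
  (∃ n ≤ tree.length, pvParentIter tree n src = some 1) ∧
  (∃ n ≤ tree.length, pvParentIter tree n dest = some 1)
instance (tree : List (Int × List (List Int))) (src : Int) (dest : Int) : Decidable (Pre_min_power_tree tree src dest) := by unfold Pre_min_power_tree; infer_instance

def pvWitness_min_power_tree : (List (Int × List (List Int))) × Int × Int := ([(2, [[1, 3]])], 2, 1)

def Spec_min_power_tree (tree : List (Int × List (List Int))) (src : Int) (dest : Int) (out : List Int × Int) : Prop := out = min_power_tree_alt tree src dest
instance (tree : List (Int × List (List Int))) (src : Int) (dest : Int) (out : List Int × Int) : Decidable (Spec_min_power_tree tree src dest out) := by unfold Spec_min_power_tree; infer_instance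

-- ===== CLAIM (what is proved, stated in full; the proofs are below) =====
def Claim_equal_min_power_tree : Prop := ∀ (tree : List (Int × List (List Int))) (src : Int) (dest : Int), Dom_min_power_tree tree src dest → Pre_min_power_tree tree src dest → Spec_min_power_tree tree src dest (min_power_tree tree src dest)

-- ===== LEMMAS AND PROOFS =====

theorem pvChain_one (tree : List (Int × List (List Int))) (f : Nat) :
    pvChain tree f 1 = some [(1, 0)] := by
  cases f <;> simp [pvChain]

theorem pvChain_mono (tree : List (Int × List (List Int))) :
    ∀ (f : Nat) (c : Int) (l : List (Int × Int)), pvChain tree f c = some l →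
    ∀ g, f ≤ g → pvChain tree g c = some l := by
  intro f
  induction f with
  | zero =>
    intro c l h g _
    by_cases hc : c = 1
    · subst hc
      simp [pvChain_one] at h
      simp [pvChain_one, ← h]
    · simp [pvChain, hc] at h
  | succ f ih =>
    intro c l h g hg
    by_cases hc : c = 1
    · subst hc
      simp [pvChain_one] at h
      simp [pvChain_one, ← h]
    · obtain ⟨g', rfl⟩ : ∃ g', g = g' + 1 := ⟨g - 1, by omega⟩
      simp only [pvChain, hc, reduceIte] at h ⊢
      rcases hstep : pvStep tree c with _ | pw
      · simp [hstep] at h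
      · simp only [hstep] at h ⊢
        rcases hrest : pvChain tree f pw.1 with _ | rest
        · simp [hrest] at h
        · rw [ih pw.1 rest hrest g' (by omega)]
          simpa [hrest] using h

theorem pvChain_unique (tree : List (Int × List (List Int))) :
    ∀ (f : Nat) (c : Int) (l : List (Int × Int)) (g : Nat) (l' : List (Int × Int)),
    pvChain tree f c = some l → pvChain tree g c = some l' → l = l' := by
  intro f
  induction f with
  | zero =>
    intro c l g l' h h'
    by_cases hc : c = 1
    · subst hc; simp [pvChain_one] at h h'; rw [← h, ← h']
    · simp [pvChain, hc] at h
  | succ f ih =>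
    intro c l g l' h h'
    by_cases hc : c = 1
    · subst hc; simp [pvChain_one] at h h'; rw [← h, ← h']
    · obtain ⟨g', rfl⟩ : ∃ g'', g = g'' + 1 := by
        cases g with
        | zero => simp [pvChain, hc] at h'
        | succ g'' => exact ⟨g'', rfl⟩
      simp only [pvChain, hc, reduceIte] at h h'
      rcases hstep : pvStep tree c with _ | pw
      · simp [hstep] at h
      · simp only [hstep] at h h'
        rcases hrest : pvChain tree f pw.1 with _ | rest
        · simp [hrest] at h
        · rcases hrest' : pvChain tree g' pw.1 with _ | rest'
          · simp [hrest'] at h'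
          · simp only [hrest, hrest', Option.map_some, Option.some_inj] at h h'
            subst h; subst h'
            rw [ih pw.1 rest g' rest' hrest hrest']

theorem pvChain_shape (tree : List (Int × List (List Int))) :
    ∀ (f : Nat) (c : Int) (l : List (Int × Int)), pvChain tree f c = some l →
    l ≠ [] ∧ l.head?.map (·.1) = some c ∧ l.getLast? = some (1, 0) := by
  intro f
  induction f with
  | zero =>
    intro c l h
    by_cases hc : c = 1
    · subst hc; simp [pvChain_one] at h; simp [← h]
    · simp [pvChain, hc] at h
  | succ f ih =>
    intro c l h
    by_cases hc : c = 1
    · subst hc; simp [pvChain_one] at h; simp [← h]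
    · simp only [pvChain, hc, reduceIte] at h
      rcases hstep : pvStep tree c with _ | pw
      · simp [hstep] at h
      · simp only [hstep] at h
        rcases hrest : pvChain tree f pw.1 with _ | rest
        · simp [hrest] at h
        · simp only [hrest, Option.map_some, Option.some_inj] at h
          subst h
          obtain ⟨hne, _, hlast⟩ := ih pw.1 rest hrest
          refine ⟨by simp, by simp, ?_⟩
          rcases rest with _ | ⟨r, rs⟩
          · exact absurd rfl hne
          · rwa [List.getLast?_cons_cons]

theorem pvChain_suffix (tree : List (Int × List (List Int))) :
    ∀ (f : Nat) (c : Int) (l : List (Int × Int)), pvChain tree f c = some l →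
    ∀ (k : Nat), k < l.length → pvChain tree f ((l.getD k (0, 0)).1) = some (l.drop k) := by
  intro f
  induction f with
  | zero =>
    intro c l h k hk
    by_cases hc : c = 1
    · subst hc
      simp [pvChain_one] at h
      subst h
      simp at hk
      subst hk
      simpa using pvChain_one tree 0
    · simp [pvChain, hc] at h
  | succ f ih =>
    intro c l h k hk
    by_cases hc : c = 1
    · subst hc
      simp [pvChain_one] at h
      subst h
      simp at hk
      subst hk
      simpa using pvChain_one tree (f + 1)
    · simp only [pvChain, hc, reduceIte] at h
      rcases hstep : pvStep tree c with _ | pw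
      · simp [hstep] at h
      · simp only [hstep] at h
        rcases hrest : pvChain tree f pw.1 with _ | rest
        · simp [hrest] at h
        · simp only [hrest, Option.map_some, Option.some_inj] at h
          subst h
          cases k with
          | zero =>
            simp only [List.getD_cons_zero, List.drop_zero]
            simp only [pvChain, hc, reduceIte, hstep, hrest, Option.map_some]
          | succ k =>
            simp only [List.getD_cons_succ, List.drop_succ_cons]
            simp only [List.length_cons] at hk
            exact pvChain_mono tree f _ _ (ih pw.1 rest hrest k (by omega)) (f + 1) (by omega)

theorem pvChain_nodup (tree : List (Int × List (List Int))) :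
    ∀ (f : Nat) (c : Int) (l : List (Int × Int)), pvChain tree f c = some l →
    (l.map (·.1)).Nodup := by
  intro f
  induction f with
  | zero =>
    intro c l h
    by_cases hc : c = 1
    · subst hc; simp [pvChain_one] at h; simp [← h]
    · simp [pvChain, hc] at h
  | succ f ih =>
    intro c l h
    by_cases hc : c = 1
    · subst hc; simp [pvChain_one] at h; simp [← h]
    · simp only [pvChain, hc, reduceIte] at h
      rcases hstep : pvStep tree c with _ | pw
      · simp [hstep] at h
      · simp only [hstep] at h
        rcases hrest : pvChain tree f pw.1 with _ | rest
        · simp [hrest] at h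
        · simp only [hrest, Option.map_some, Option.some_inj] at h
          subst h
          simp only [List.map_cons, List.nodup_cons]
          refine ⟨?_, ih pw.1 rest hrest⟩
          intro hmem
          obtain ⟨e, he, hec⟩ := List.mem_map.mp hmem
          obtain ⟨k, hk, hke⟩ := List.getElem_of_mem he
          have hsuf := pvChain_suffix tree f pw.1 rest hrest k hk
          rw [List.getD_eq_getElem rest (0, 0) hk, hke, hec] at hsuf
          have hfull : pvChain tree (f + 1) c = some ((c, pw.2) :: rest) := by
            simp only [pvChain, hc, reduceIte, hstep, hrest, Option.map_some]
          have := pvChain_unique tree (f + 1) c _ f _ hfull (pvChain_mono tree f c _ hsuf f le_rfl)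
          have hlen := congrArg List.length this
          simp [List.length_drop] at hlen
          omega

theorem pvDescend_spec (tree : List (Int × List (List Int))) (S : PySem.Set Int)
    (hS1 : PySem.Set.contains S 1 = true) :
    ∀ (f : Nat) (c : Int) (l : List (Int × Int)), pvChain tree f c = some l →
    ∃ m, m < l.length ∧
      (∀ u, u < m → PySem.Set.contains S ((l.getD u (0, 0)).1) = false) ∧
      PySem.Set.contains S ((l.getD m (0, 0)).1) = true ∧
      pvDescend tree S f c = some (l.take m, (l.getD m (0, 0)).1) := by
  have hS1' : 1 ∈ S := by simpa using hS1
  intro f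
  induction f with
  | zero =>
    intro c l h
    by_cases hc : c = 1
    · subst hc
      simp [pvChain_one] at h
      subst h
      exact ⟨0, by simp, by omega, by simpa using hS1, by simp [pvDescend, hS1']⟩
    · simp [pvChain, hc] at h
  | succ f ih =>
    intro c l h
    by_cases hc : c = 1
    · subst hc
      simp [pvChain_one] at h
      subst h
      exact ⟨0, by simp, by omega, by simpa using hS1, by simp [pvDescend, hS1']⟩
    · simp only [pvChain, hc, reduceIte] at h
      rcases hstep : pvStep tree c with _ | pw
      · simp [hstep] at h
      · simp only [hstep] at h
        rcases hrest : pvChain tree f pw.1 with _ | rest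
        · simp [hrest] at h
        · simp only [hrest, Option.map_some, Option.some_inj] at h
          subst h
          by_cases hcS : c ∈ S
          · exact ⟨0, by simp, by omega, by simpa using hcS, by simp [pvDescend, hcS]⟩
          · obtain ⟨m, hm, hpre, hhit, hdesc⟩ := ih pw.1 rest hrest
            refine ⟨m + 1, by simpa using hm, ?_, by simpa using hhit, ?_⟩
            · intro u hu
              cases u with
              | zero => simpa using hcS
              | succ u => simpa using hpre u (by omega)
            · have hcS' : PySem.Set.contains S c = false := by
                simp [hcS]
              simp only [pvDescend, hcS', Bool.false_eq_true, reduceIte, hstep, hdesc,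
                Option.map_some]
              simp

theorem pvLcaLoop_run (s d : List (Int × Int)) (k m : Nat)
    (hk : k < s.length) (hm : m < d.length)
    (hdrop : s.drop k = d.drop m)
    (hstop : ¬(1 ≤ k ∧ 1 ≤ m ∧ (s.getD (k - 1) (0, 0)).1 = (d.getD (m - 1) (0, 0)).1)) :
    ∀ (r : Nat), ∀ (a b : Nat), a = k + r → b = m + r → a ≤ s.length → b ≤ d.length →
    pvLcaLoop s d ((a : Int) - 1) ((b : Int) - 1) = ((k : Int) - 1, (m : Int) - 1) := by
  intro r
  induction r with
  | zero =>
    intro a b ha hb hA hB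
    rw [show ((a : Int) - 1) = (k : Int) - 1 by omega,
       show ((b : Int) - 1) = (m : Int) - 1 by omega]
    rw [pvLcaLoop]
    by_cases h0 : 1 ≤ k ∧ 1 ≤ m
    · rw [dif_pos (by omega)]
      have hks : ((k : Int) - 1) = ((k - 1 : Nat) : Int) := by omega
      have hms : ((m : Int) - 1) = ((m - 1 : Nat) : Int) := by omega
      rw [hks, hms, PySem.List.pyGet?_natCast, PySem.List.pyGet?_natCast]
      rw [List.getElem?_eq_getElem (by omega), List.getElem?_eq_getElem (by omega)]
      have hne : s[k - 1].1 ≠ d[m - 1].1 := by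
        intro heq
        exact hstop ⟨h0.1, h0.2, by
          rw [List.getD_eq_getElem s (0,0) (by omega), List.getD_eq_getElem d (0,0) (by omega)]
          exact heq⟩
      simp only [hne, reduceIte]
    · rw [dif_neg (by omega)]
  | succ r ih =>
    intro a b ha hb hA hB
    rw [pvLcaLoop]
    rw [dif_pos (by omega)]
    have has : ((a : Int) - 1) = ((a - 1 : Nat) : Int) := by omega
    have hbs : ((b : Int) - 1) = ((b - 1 : Nat) : Int) := by omega
    rw [has, hbs, PySem.List.pyGet?_natCast, PySem.List.pyGet?_natCast]
    rw [List.getElem?_eq_getElem (by omega), List.getElem?_eq_getElem (by omega)]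
    have heq : s[a - 1] = d[b - 1] := by
      have h1 : s[a - 1] = (s.drop k)[r]'(by simp; omega) := by
        rw [List.getElem_drop]
        congr 1
        omega
      have h2 : d[b - 1] = (d.drop m)[r]'(by simp; omega) := by
        rw [List.getElem_drop]
        congr 1
        omega
      rw [h1, h2]
      congr 1
    rw [heq]
    simp only [reduceIte]
    have := ih (a - 1) (b - 1) (by omega) (by omega) (by omega) (by omega)
    convert this using 2

theorem pvMax_bridge (P1 P2 : List Int) :
    (PySem.List.max? (P1 ++ 0 :: P2.reverse) (fun x => x)).getD 0 = (P1 ++ P2).foldl max 0 := by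
  rcases hM : PySem.List.max? (P1 ++ 0 :: P2.reverse) (fun x => x) with _ | M
  · rw [PySem.List.max?_eq_none_iff] at hM
    simp at hM
  · have hMem : M ∈ P1 ++ 0 :: P2.reverse := PySem.List.max?_mem hM
    have hMax : ∀ y ∈ P1 ++ 0 :: P2.reverse, y ≤ M := by
      intro y hy
      exact PySem.List.max?_isMax hM y hy
    have hfold := PySem.List.le_foldl_max (P1 ++ P2) 0
    have hfm := PySem.List.foldl_max_mem (P1 ++ P2) 0
    simp only [Option.getD_some]
    apply le_antisymm
    · rcases List.mem_append.mp hMem with h1 | h12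
      · exact hfold.2 M (List.mem_append.mpr (Or.inl h1))
      · rcases List.mem_cons.mp h12 with h0 | h2
        · rw [h0]; exact hfold.1
        · exact hfold.2 M (List.mem_append.mpr (Or.inr (List.mem_reverse.mp h2)))
    · rcases hfm with h0 | hmem2
      · rw [h0]
        exact hMax 0 (List.mem_append.mpr (Or.inr (List.mem_cons_self)))
      · rcases List.mem_append.mp hmem2 with h1 | h2
        · exact hMax _ (List.mem_append.mpr (Or.inl h1))
        · exact hMax _ (List.mem_append.mpr (Or.inr (List.mem_cons_of_mem _ (List.mem_reverse.mpr h2))))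

theorem pvParentIter_chain (tree : List (Int × List (List Int))) :
    ∀ (n : Nat) (c : Int), pvParentIter tree n c = some 1 →
    ∀ f, n ≤ f → (pvChain tree f c).isSome = true := by
  intro n
  induction n with
  | zero =>
    intro c h f _
    simp [pvParentIter] at h
    subst h
    simp [pvChain_one]
  | succ n ih =>
    intro c h f hf
    by_cases hc : c = 1
    · subst hc; simp [pvChain_one]
    · obtain ⟨f', rfl⟩ : ∃ f', f = f' + 1 := ⟨f - 1, by omega⟩
      simp only [pvParentIter] at h
      rcases hstep : pvStep tree c with _ | pw
      · simp [hstep] at h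
      · simp only [hstep] at h
        have := ih pw.1 h f' (by omega)
        simp only [pvChain, hc, reduceIte, hstep]
        rcases hx : pvChain tree f' pw.1 with _ | rest
        · simp [hx] at this
        · simp

theorem pv_main (tree : List (Int × List (List Int))) (src : Int) (dest : Int)
    (hpreS : ∃ n ≤ tree.length, pvParentIter tree n src = some 1)
    (hpreD : ∃ n ≤ tree.length, pvParentIter tree n dest = some 1) :
    min_power_tree tree src dest = min_power_tree_alt tree src dest := by
  obtain ⟨ns, hns, hitS⟩ := hpreS
  obtain ⟨nd, hnd, hitD⟩ := hpreD
  obtain ⟨s, hs⟩ := Option.isSome_iff_exists.mp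
    (pvParentIter_chain tree ns src hitS (tree.length + 1) (by omega))
  obtain ⟨d, hd⟩ := Option.isSome_iff_exists.mp
    (pvParentIter_chain tree nd dest hitD (tree.length + 1) (by omega))
  -- basic shapes
  obtain ⟨hsne, hshead, hslast⟩ := pvChain_shape tree _ _ _ hs
  obtain ⟨hdne, hdhead, hdlast⟩ := pvChain_shape tree _ _ _ hd
  have hnodup : (s.map (·.1)).Nodup := pvChain_nodup tree _ _ _ hs
  -- 1 is on src's chain
  have h1mem : (1 : Int) ∈ s.map (·.1) :=
    List.mem_map.mpr ⟨(1, 0), List.mem_of_getLast? hslast, rfl⟩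
  have hS1 : PySem.Set.contains (PySem.Set.ofList (s.map (·.1))) 1 = true := by
    simp [PySem.Set.mem_ofList, h1mem]
  -- B's descend stops at the first node of d's chain lying on s's chain
  obtain ⟨m, hmlt, hmin, hhit, hdesc⟩ :=
    pvDescend_spec tree _ hS1 (tree.length + 1) dest d hd
  set lca := (d.getD m (0, 0)).1 with hlca_def
  have hlca_mem : lca ∈ s.map (·.1) := by
    have := hhit
    simpa [PySem.Set.mem_ofList] using this
  obtain ⟨e, he, hec⟩ := List.mem_map.mp hlca_mem
  obtain ⟨k, hks, hke⟩ := List.getElem_of_mem he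
  have hk_node : s[k].1 = lca := by rw [hke, hec]
  -- the two chains share the suffix from the LCA on
  have hsufS := pvChain_suffix tree _ _ _ hs k hks
  have hsufD := pvChain_suffix tree _ _ _ hd m hmlt
  rw [List.getD_eq_getElem s (0, 0) hks, hk_node] at hsufS
  have hdropk : s.drop k = d.drop m :=
    pvChain_unique tree _ _ _ _ _ hsufS hsufD
  have hlen : s.length - k = d.length - m := by
    have := congrArg List.length hdropk
    simp at this
    omega
  -- A's lockstep loop stops exactly there
  have hstop : ¬(1 ≤ k ∧ 1 ≤ m ∧ (s.getD (k - 1) (0, 0)).1 = (d.getD (m - 1) (0, 0)).1) := by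
    rintro ⟨hk1, hm1, heq⟩
    have hd1 : (d.getD (m - 1) (0, 0)).1 ∈ s.map (·.1) := by
      rw [← heq]
      rw [List.getD_eq_getElem s (0, 0) (by omega)]
      exact List.mem_map.mpr ⟨_, List.getElem_mem _, rfl⟩
    have := hmin (m - 1) (by omega)
    rw [← Bool.not_eq_true] at this
    exact this (by simpa [PySem.Set.mem_ofList] using hd1)
  have hloop := pvLcaLoop_run s d k m hks hmlt hdropk hstop (s.length - k)
    s.length (m + (s.length - k)) (by omega) (by omega) le_rfl (by omega)
  rw [show m + (s.length - k) = d.length by omega] at hloop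
  -- evaluate port A
  rw [min_power_tree, min_power_tree_alt]
  simp only [hs, hd, hdesc, hloop]
  -- slices and the mutated entry
  rw [show ((k : Int) - 1 + 2) = ((k + 1 : Nat) : Int) by omega,
      show ((m : Int) - 1 + 1) = ((m : Nat) : Int) by omega,
      PySem.List.slice_to_natCast, PySem.List.slice_to_natCast,
      show ((k : Int) - 1 + 1).toNat = k by omega]
  have htk : (s.take (k + 1))[k]? = some s[k] := by
    simp [List.getElem?_eq_getElem hks]
  rw [htk]
  have hred : ∀ (L : List (Int × Int)),
      (match some s[k] with
        | some e => L.set k (e.1, 0)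
        | none => L) = L.set k (s[k].1, 0) := fun _ => rfl
  rw [hred]
  have hset : (s.take (k + 1)).set k (s[k].1, 0) = s.take k ++ [(s[k].1, 0)] := by
    rw [List.take_add_one, List.getElem?_eq_getElem hks]
    simp only [Option.toList_some]
    rw [List.set_append]
    simp [List.length_take, Nat.min_eq_left (le_of_lt hks)]
  rw [hset]
  -- B's nodes.index(c) is k
  have hidxof : PySem.List.index? (s.map (·.1)) lca = some k := by
    rw [PySem.List.index?_eq_some_iff]
    refine ⟨(s.map (·.1)).take k, (s.map (·.1)).drop (k + 1), ?_, ?_, ?_⟩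
    · conv_lhs => rw [← List.take_append_drop k (s.map (·.1))]
      congr 1
      rw [← List.getElem_cons_drop]
      · congr 1
        rw [List.getElem_map]
        exact hk_node
      · simpa using hks
    · simp [List.length_take]
      omega
    · intro hmem
      obtain ⟨u, hu, huv⟩ := List.getElem_of_mem hmem
      rw [List.getElem_take] at huv
      have hul : u < (s.map (·.1)).length := by simp at hu ⊢; omega
      have hkl : k < (s.map (·.1)).length := by simpa using hks
      have : (s.map (·.1))[u]'hul = (s.map (·.1))[k]'hkl := by
        rw [huv, List.getElem_map]
        exact hk_node.symm
      have := (List.Nodup.getElem_inj_iff hnodup).mp this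
      simp [List.length_take] at hu
      omega
  rw [hidxof]
  simp only [Option.getD_some]
  -- assemble both components
  rw [Prod.mk.injEq]
  constructor
  · simp [List.map_take, hk_node]
  · rw [show ((s.take k ++ [(s[k].1, 0)]) ++ (d.take m).reverse)
        = s.take k ++ [(s[k].1, 0)] ++ (d.take m).reverse by simp]
    have hmapsnd : ((s.take k ++ [(s[k].1, 0)]) ++ (d.take m).reverse).map (fun x : Int × Int => x.2)
        = ((s.take k).map (fun x : Int × Int => x.2)) ++ 0 :: ((d.take m).map (fun x : Int × Int => x.2)).reverse := by
      simp [List.map_reverse]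
    rw [hmapsnd, pvMax_bridge]
    rw [← List.foldl_map (f := fun e : Int × Int => e.2) (g := max) (l := (s.take k) ++ (d.take m)) (init := 0)]
    simp

-- ===== VERDICT (by name: the statement is the Claim_ definition above) =====
theorem min_power_tree_spec : Claim_equal_min_power_tree := by
  intro tree src dest _ hpre
  exact pv_main tree src dest hpre.1 hpre.2
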